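-- pv_equiv track=rewrite | github.com/hoondongkim/syntaxnet-kr | SJtoUD_Type2.py | wordDicToNumDic
-- ===== SOURCE A (Python) =====
-- def wordDicToNumDic(wordDic, levelCountArray):
--     resultDic = dict()
--     sumResult = 0
--     for levelIndex in range(0, len(levelCountArray)) :
--         if (levelIndex == 0 ):
--             resultDic[levelIndex] = levelCountArray[levelIndex]
--         else:
--             resultDic[levelIndex] = resultDic[levelIndex - 1] + levelCountArray[levelIndex]
--     return  resultDic
-- ===== SOURCE B (Python) =====
-- def wordDicToNumDic(wordDic, levelCountArray):
--     # Each entry is computed independently as the prefix sum by definition: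
--     # no running accumulator, no back-reference into the result.
--     return {i: sum(levelCountArray[:i + 1]) for i in range(len(levelCountArray))}
-- ===== Notes on version B (the rewrite author's own statement) =====
-- stated objective: alternative
-- what changed: Replaces A's stateful loop that reads the previous total back out of the result dict (with a special index-0 branch) by a stateless dict comprehension computing each entry independently as sum(levelCountArray[:i+1]); trades the single accumulating pass for per-index prefix-sum recomputation (O(n^2)).
import Mathlib
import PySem

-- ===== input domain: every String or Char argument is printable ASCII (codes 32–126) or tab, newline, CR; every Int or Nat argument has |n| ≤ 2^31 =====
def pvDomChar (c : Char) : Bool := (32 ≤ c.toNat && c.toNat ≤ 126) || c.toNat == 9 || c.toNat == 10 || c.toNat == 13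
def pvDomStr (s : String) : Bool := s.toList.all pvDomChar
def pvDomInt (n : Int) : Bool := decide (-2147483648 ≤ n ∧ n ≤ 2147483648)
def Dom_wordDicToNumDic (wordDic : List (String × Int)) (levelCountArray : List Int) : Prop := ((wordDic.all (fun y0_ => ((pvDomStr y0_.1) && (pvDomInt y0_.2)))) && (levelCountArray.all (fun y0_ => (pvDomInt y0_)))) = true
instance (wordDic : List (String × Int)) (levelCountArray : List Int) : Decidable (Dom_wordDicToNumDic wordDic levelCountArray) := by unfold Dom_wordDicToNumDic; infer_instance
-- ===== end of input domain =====

-- B computes each dict entry independently as sum(levelCountArray[:i+1]) in a stateless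
-- comprehension, instead of A's accumulating loop that reads the previous total back out
-- of the result dict (alternative algorithm; A is O(n), B is O(n^2)).

-- ===== PORT A =====
def wordDicToNumDic (wordDic : List (String × Int)) (levelCountArray : List Int) : List (Int × Int) :=
  -- resultDic = dict(); for levelIndex in range(0, len(levelCountArray)): ...
  (((PySem.List.pyRange 0 (levelCountArray.length : Int) 1).foldl
      (fun (d : PySem.Dict Int Int) (levelIndex : Int) =>
        if levelIndex == 0 then
          d.insert levelIndex (PySem.List.pyGetD levelCountArray levelIndex 0)
        else
          d.insert levelIndex (d.getD (levelIndex - 1) 0 + PySem.List.pyGetD levelCountArray levelIndex 0))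
      PySem.Dict.empty) : PySem.Dict Int Int).items

-- ===== PORT B =====
-- dict comprehension over range(len(arr)); the keys i are distinct and increasing,
-- so the dict's items are exactly this list of pairs in order.
def wordDicToNumDic_alt (wordDic : List (String × Int)) (levelCountArray : List Int) : List (Int × Int) :=
  (PySem.List.pyRange 0 (levelCountArray.length : Int) 1).map
    (fun i => (i, (PySem.List.slice levelCountArray none (some (i + 1))).sum))

-- ===== PRECONDITION & SPEC =====
def Spec_wordDicToNumDic (wordDic : List (String × Int)) (levelCountArray : List Int) (out : List (Int × Int)) : Prop := out = wordDicToNumDic_alt wordDic levelCountArray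
instance (wordDic : List (String × Int)) (levelCountArray : List Int) (out : List (Int × Int)) : Decidable (Spec_wordDicToNumDic wordDic levelCountArray out) := by unfold Spec_wordDicToNumDic; infer_instance

-- ===== CLAIM =====
def Claim_equal_wordDicToNumDic : Prop := ∀ (wordDic : List (String × Int)) (levelCountArray : List Int), Dom_wordDicToNumDic wordDic levelCountArray → Spec_wordDicToNumDic wordDic levelCountArray (wordDicToNumDic wordDic levelCountArray)

-- ===== LEMMAS AND PROOFS =====

-- running prefix totals, used only to characterise A's loop
def pvRunning (total : Int) : List Int → List Int
  | [] => []
  | c :: rest => (total + c) :: pvRunning (total + c) rest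

theorem pvRunning_length (s : Int) (l : List Int) : (pvRunning s l).length = l.length := by
  induction l generalizing s with
  | nil => rfl
  | cons c rest ih => simp [pvRunning, ih]

theorem pvRunning_append_singleton (s : Int) (l : List Int) (y : Int) :
    pvRunning s (l ++ [y]) = pvRunning s l ++ [s + l.sum + y] := by
  induction l generalizing s with
  | nil => simp [pvRunning]
  | cons c rest ih => simp [pvRunning, ih]; ring_nf

theorem pvRunning_getElem (s : Int) (l : List Int) (k : Nat) (hk : k < l.length) :
    (pvRunning s l)[k]'(by rw [pvRunning_length]; exact hk) = s + (l.take (k + 1)).sum := by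
  induction l generalizing s k with
  | nil => simp at hk
  | cons c rest ih =>
    cases k with
    | zero => simp [pvRunning]
    | succ m =>
      have := ih (s + c) m (by simpa using hk)
      simpa [pvRunning, add_assoc] using this

theorem getD_mk_enumerate (xs : List Int) (k : Nat) (hk : k < xs.length) :
    (PySem.Dict.mk (PySem.List.enumerate xs 0)).getD (k : Int) 0 = xs[k] := by
  apply PySem.Dict.getD_of_mem_items
  · have : ((0 : Int) + k, xs[k]) ∈ PySem.List.enumerate xs 0 := by
      rw [PySem.List.mem_enumerate_iff]; exact ⟨k, hk, rfl⟩
    simpa using this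
  · show (PySem.List.enumerate xs 0).map (·.1) |>.Nodup
    rw [PySem.List.map_fst_enumerate]
    exact PySem.List.nodup_pyRange_one 0 _

theorem loopA_eq (arr : List Int) (n : Nat) (hn : n ≤ arr.length) :
    ((PySem.List.pyRange 0 (n : Int) 1).foldl
      (fun (d : PySem.Dict Int Int) (levelIndex : Int) =>
        if levelIndex == 0 then
          d.insert levelIndex (PySem.List.pyGetD arr levelIndex 0)
        else
          d.insert levelIndex (d.getD (levelIndex - 1) 0 + PySem.List.pyGetD arr levelIndex 0))
      PySem.Dict.empty)
    = PySem.Dict.mk (PySem.List.enumerate (pvRunning 0 (arr.take n)) 0) := by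
  induction n with
  | zero => simp [pvRunning, PySem.Dict.empty]
  | succ m ih =>
    have hm : m ≤ arr.length := Nat.le_of_succ_le hn
    have hmlt : m < arr.length := hn
    have hsplit : PySem.List.pyRange 0 ((m + 1 : Nat) : Int) 1
        = PySem.List.pyRange 0 (m : Int) 1 ++ [(m : Int)] := by
      push_cast
      exact PySem.List.pyRange_one_succ_right (by positivity)
    rw [hsplit, List.foldl_append, ih hm]
    have htake : arr.take (m + 1) = arr.take m ++ [arr[m]] := by
      rw [List.take_add_one]
      simp [List.getElem?_eq_getElem hmlt]
    have hlen : (pvRunning 0 (arr.take m)).length = m := by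
      rw [pvRunning_length]; exact List.length_take_of_le hm
    have hget : PySem.List.pyGetD arr (m : Int) 0 = arr[m] := by
      rw [PySem.List.pyGetD_natCast]
      exact List.getD_eq_getElem _ _ hmlt
    have hfresh : (PySem.Dict.mk (PySem.List.enumerate (pvRunning 0 (arr.take m)) 0)).contains (m : Int) = false := by
      rw [← Bool.not_eq_true, PySem.Dict.contains_iff_mem_keys]
      show ¬ ((m : Int) ∈ (PySem.List.enumerate (pvRunning 0 (arr.take m)) 0).map (·.1))
      rw [PySem.List.map_fst_enumerate]
      rw [hlen]
      simp [PySem.List.mem_pyRange_one]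
    have happ : ∀ v : Int,
        (PySem.Dict.mk (PySem.List.enumerate (pvRunning 0 (arr.take m)) 0)).insert (m : Int) v
        = PySem.Dict.mk (PySem.List.enumerate (pvRunning 0 (arr.take m)) 0 ++ [((m : Int), v)]) := by
      intro v
      apply PySem.Dict.ext
      simp [PySem.Dict.items_insert, hfresh]
    rw [htake, pvRunning_append_singleton, PySem.List.enumerate_append]
    cases m with
    | zero =>
      simp only [List.foldl_cons, List.foldl_nil]
      rw [if_pos (by simp)]
      rw [happ]
      have hget0 : PySem.List.pyGetD arr (0 : Int) 0 = arr[0] := by simpa using hget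
      simp [hget0, pvRunning]
    | succ p =>
      simp only [List.foldl_cons, List.foldl_nil]
      rw [if_neg (show ¬((((p + 1 : Nat) : Int)) == 0) = true by simp; omega)]
      have hplt : p < (arr.take (p + 1)).length := by
        rw [List.length_take_of_le hm]; omega
      have hkey : ((p + 1 : Nat) : Int) - 1 = ((p : Nat) : Int) := by push_cast; ring
      have hgd : (PySem.Dict.mk (PySem.List.enumerate (pvRunning 0 (arr.take (p + 1))) 0)).getD (((p + 1 : Nat) : Int) - 1) 0
          = (arr.take (p + 1)).sum := by
        rw [hkey, getD_mk_enumerate _ p (by rw [pvRunning_length]; exact hplt)]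
        rw [pvRunning_getElem 0 _ p hplt]
        simp [List.take_take]
      rw [happ, hgd]
      have hget' : PySem.List.pyGetD arr ((p : Int) + 1) 0 = arr[p + 1] := by push_cast at hget; exact hget
      simp [hget', hlen]

-- A's accumulated list equals B's per-index prefix sums, pointwise
theorem enumerate_running_eq_map (arr : List Int) :
    PySem.List.enumerate (pvRunning 0 arr) 0
      = (PySem.List.pyRange 0 (arr.length : Int) 1).map
          (fun i => (i, (PySem.List.slice arr none (some (i + 1))).sum)) := by
  apply List.ext_getElem
  · simp [PySem.List.length_enumerate, pvRunning_length, PySem.List.length_pyRange_one]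
  · intro k h1 h2
    have hk : k < arr.length := by
      simpa [PySem.List.length_enumerate, pvRunning_length] using h1
    rw [List.getElem_map, PySem.List.getElem_enumerate, PySem.List.getElem_pyRange_one]
    have hs : PySem.List.slice arr none (some ((0 : Int) + (k : Int) + 1)) = arr.take (k + 1) := by
      have : (0 : Int) + (k : Int) + 1 = ((k + 1 : Nat) : Int) := by push_cast; ring
      rw [this, PySem.List.slice_to_natCast]
    rw [hs]
    have := pvRunning_getElem 0 arr k hk
    simp only [zero_add] at this ⊢
    rw [this]

-- ===== VERDICT =====
theorem wordDicToNumDic_spec : Claim_equal_wordDicToNumDic := by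
  intro wordDic arr _
  show wordDicToNumDic wordDic arr = wordDicToNumDic_alt wordDic arr
  unfold wordDicToNumDic wordDicToNumDic_alt
  rw [loopA_eq arr arr.length le_rfl]
  rw [List.take_length, ← enumerate_running_eq_map]
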